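-- pv_equiv track=rewrite | github.com/Ares-Infenus/etl-finance-pipeline | src/etl/transform/normalize.py | _build_rename_map
-- ===== SOURCE A (Python) =====
-- from typing import Dict, List, Tuple
--
-- PROTECTED = {"symbol", "ticker", "instrument", "pair"}
--
-- def _build_rename_map(df_cols: List[str], columns_map: Dict[str, List[str]]) -> Dict[str, str]:
--     """
--     Construye el diccionario de columnas a renombrar,
--     evitando match por substring y excluyendo columnas protegidas.
--     """
--     rename_dict: Dict[str, str] = {}
--     lowered = {c: c.lower() for c in df_cols}
--
--     for target, variants in columns_map.items():
--         target_up = target.upper()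
--         variants_lower = [v.lower() for v in variants]
--
--         for col, col_lower in lowered.items():
--
--             # ❌ No renombrar columnas protegidas (symbol, ticker...)
--             if col_lower in PROTECTED:
--                 continue
--
--             # ✔ Coincidencia exacta (open == open, OPEN == open)
--             if col_lower in variants_lower:
--                 rename_dict[col] = target_up
--                 continue
--
--             # ✔ Coincidencia controlada por prefijo o sufijo
--             for v in variants_lower:
--                 if not v:
--                     continue
--
--                 # prefijo exacto: open_price → OPEN
--                 if col_lower.startswith(v + "_"):
--                     rename_dict[col] = target_up
--                     break
--
--                 # sufijo exacto: price_open → OPEN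
--                 if col_lower.endswith("_" + v):
--                     rename_dict[col] = target_up
--                     break
--
--     return rename_dict
-- ===== SOURCE B (Python) =====
-- PROTECTED = {"symbol", "ticker", "instrument", "pair"}
--
--
-- def _candidate_keys(cl):
--     """Every variant string that would match the column name cl: cl itself,
--     plus the nonempty piece before and the nonempty piece after each underscore."""
--     keys = {cl}
--     for i, ch in enumerate(cl):
--         if ch == "_":
--             if i > 0:
--                 keys.add(cl[:i])
--             if i < len(cl) - 1:
--                 keys.add(cl[i + 1:])
--     return keys
--
--
-- def _build_rename_map(df_cols, columns_map):
--     """Decompose each column once into its candidate keys, then match each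
--     target's variants by set intersection instead of per-variant affix scans."""
--     keys = {}
--     for col in df_cols:
--         cl = col.lower()
--         if cl not in PROTECTED and col not in keys:
--             keys[col] = _candidate_keys(cl)
--
--     rename = {}
--     for target, variants in columns_map.items():
--         vl = {v.lower() for v in variants}
--         for col, ks in keys.items():
--             if ks & vl:
--                 rename[col] = target.upper()
--     return rename
-- ===== Notes on version B (the rewrite author's own statement) =====
-- stated objective: faster
-- what changed: B decomposes each column name once into its candidate match keys (the name itself plus the nonempty pieces before and after each underscore) and matches each target's variants by set intersection, so A's per-variant startswith/endswith scan inside the (target, column) loop disappears.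
import Mathlib
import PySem

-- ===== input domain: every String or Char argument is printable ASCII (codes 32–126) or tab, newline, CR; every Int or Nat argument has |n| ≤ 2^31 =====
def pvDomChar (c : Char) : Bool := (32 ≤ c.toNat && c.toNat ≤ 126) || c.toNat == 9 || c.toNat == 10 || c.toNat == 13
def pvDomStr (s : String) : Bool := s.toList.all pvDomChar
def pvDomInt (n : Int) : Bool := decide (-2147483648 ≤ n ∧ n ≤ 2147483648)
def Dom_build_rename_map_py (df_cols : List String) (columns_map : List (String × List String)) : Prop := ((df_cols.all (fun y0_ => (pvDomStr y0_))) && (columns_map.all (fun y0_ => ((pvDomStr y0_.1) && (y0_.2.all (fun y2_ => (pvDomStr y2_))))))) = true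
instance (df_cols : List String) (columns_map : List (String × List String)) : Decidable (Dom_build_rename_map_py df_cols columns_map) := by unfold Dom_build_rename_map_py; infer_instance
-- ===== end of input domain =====

-- B decomposes each column name once into its candidate match keys (the name itself and the
-- nonempty pieces before/after each underscore) and matches a target's variants by set
-- intersection, removing A's per-variant prefix/suffix scan from the (target, column) loop
-- (measurably faster on a timing run's generated inputs).

-- module constant PROTECTED (used by both programs)
def pvProt : List String := ["symbol", "ticker", "instrument", "pair"]

-- ===== PORT A =====
-- A's inner `for v in variants_lower` loop with its two `break`s (both inserting the same
-- value): returns whether the loop inserted.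
def pvAffixScan (cl : String) (vs : List String) : Bool :=
  match vs with
  | [] => false
  | v :: rest =>
      if v = "" then pvAffixScan cl rest
      else if PySem.Str.startswith cl (v ++ "_") then true
      else if PySem.Str.endswith cl ("_" ++ v) then true
      else pvAffixScan cl rest

def build_rename_map_py (df_cols : List String) (columns_map : List (String × List String)) : List (String × String) :=
  let lowered : PySem.Dict String String :=
    df_cols.foldl (fun d c => d.insert c (PySem.Str.lower c)) PySem.Dict.empty
  let rd : PySem.Dict String String :=
    columns_map.foldl (fun rd tv =>
      let target_up := PySem.Str.upper tv.1
      let variants_lower := tv.2.map PySem.Str.lower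
      lowered.items.foldl (fun rd p =>
        if pvProt.contains p.2 then rd
        else if variants_lower.contains p.2 then rd.insert p.1 target_up
        else if pvAffixScan p.2 variants_lower then rd.insert p.1 target_up
        else rd) rd) PySem.Dict.empty
  rd.items

-- ===== PORT B =====
-- B's helper _candidate_keys, over the lowered name's character list
def pvCandidateKeys (cl : List Char) : PySem.Set (List Char) :=
  (PySem.List.enumerate cl).foldl (fun ks ic =>
    if ic.2 = '_' then
      let ks1 := if 0 < ic.1 then PySem.Set.add ks (PySem.List.slice cl none (some ic.1)) else ks
      if ic.1 < (cl.length : Int) - 1 then PySem.Set.add ks1 (PySem.List.slice cl (some (ic.1 + 1)) none) else ks1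
    else ks) (PySem.Set.ofList [cl])

def build_rename_map_py_alt (df_cols : List String) (columns_map : List (String × List String)) : List (String × String) :=
  let keys : PySem.Dict String (PySem.Set (List Char)) :=
    df_cols.foldl (fun d col =>
      let cl := PySem.Str.lower col
      if !pvProt.contains cl && !d.contains col then d.insert col (pvCandidateKeys cl.toList)
      else d) PySem.Dict.empty
  let rename : PySem.Dict String String :=
    columns_map.foldl (fun rd tv =>
      let vl : PySem.Set (List Char) := PySem.Set.ofList (tv.2.map (fun v => PySem.Chars.lower v.toList))
      keys.items.foldl (fun rd p =>
        if (PySem.Set.inter p.2 vl).isEmpty then rd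
        else rd.insert p.1 (PySem.Str.upper tv.1)) rd) PySem.Dict.empty
  rename.items

-- ===== PRECONDITION & SPEC =====
def Spec_build_rename_map_py (df_cols : List String) (columns_map : List (String × List String)) (out : List (String × String)) : Prop := out = build_rename_map_py_alt df_cols columns_map
instance (df_cols : List String) (columns_map : List (String × List String)) (out : List (String × String)) : Decidable (Spec_build_rename_map_py df_cols columns_map out) := by unfold Spec_build_rename_map_py; infer_instance

-- ===== CLAIM (what is proved, stated in full; the proofs are below) =====
def Claim_equal_build_rename_map_py : Prop := ∀ (df_cols : List String) (columns_map : List (String × List String)), Dom_build_rename_map_py df_cols columns_map → Spec_build_rename_map_py df_cols columns_map (build_rename_map_py df_cols columns_map)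

-- ===== LEMMAS AND PROOFS =====

-- columns kept by both programs: not protected (after lowering)
def pvKeep (c : String) : Bool := !pvProt.contains (PySem.Str.lower c)


lemma pv_foldl_add_cons {α : Type} [BEq α] [LawfulBEq α] (l : List α) :
    ∀ (c : α) (s : List α),
      l.foldl PySem.Set.add (c :: s) = c :: (l.filter (fun x => !(x == c))).foldl PySem.Set.add s := by
  induction l with
  | nil => intro c s; rfl
  | cons x rest ih =>
      intro c s
      simp only [List.foldl_cons, List.filter_cons]
      by_cases hxc : x = c
      · have : (x == c) = true := by simp [hxc]
        rw [this]
        have hadd : PySem.Set.add (c :: s) x = c :: s := by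
          simp [PySem.Set.add, PySem.Set.contains, hxc]
        simp only [Bool.not_true, hadd]
        exact ih c s
      · have hbc : (x == c) = false := by simp [hxc]
        rw [hbc]
        have hadd : PySem.Set.add (c :: s) x = c :: PySem.Set.add s x := by
          simp only [PySem.Set.add, PySem.Set.contains, List.contains_cons]
          have : (x == c) = false := hbc
          rw [this]
          simp only [Bool.false_or]
          split_ifs <;> rfl
        rw [hadd]
        simp only [Bool.not_false]
        exact ih c (PySem.Set.add s x)

lemma pv_dedup_filter {α : Type} [BEq α] [LawfulBEq α] (p : α → Bool) (l : List α) :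
    PySem.List.dedup (l.filter p) = (PySem.List.dedup l).filter p := by
  have key : ∀ (l : List α) (s : List α),
      (l.filter p).foldl PySem.Set.add (s.filter p) = (l.foldl PySem.Set.add s).filter p := by
    intro l
    induction l with
    | nil => intro s; rfl
    | cons x rest ih =>
        intro s
        by_cases hp : p x = true
        · have h1 : (x :: rest).filter p = x :: rest.filter p := by simp [hp]
          rw [h1, List.foldl_cons, List.foldl_cons]
          have h2 : PySem.Set.add (s.filter p) x = (PySem.Set.add s x).filter p := by
            simp only [PySem.Set.add, PySem.Set.contains]
            by_cases hm : x ∈ s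
            · have h1 : s.contains x = true := by simpa using hm
              have hf : (s.filter p).contains x = true := by
                simp only [List.contains_iff_mem, List.mem_filter]; exact ⟨hm, hp⟩
              simp only [h1, hf]
              simp
            · have h1 : s.contains x = false := by simpa using hm
              have hf : (s.filter p).contains x = false := by
                simp [List.mem_filter, hm]
              simp only [h1, hf, Bool.false_eq_true, if_false]
              simp [hp]
          rw [h2]; exact ih (PySem.Set.add s x)
        · have hp' : p x = false := by simpa using hp
          have h1 : (x :: rest).filter p = rest.filter p := by simp [hp']
          rw [h1, List.foldl_cons]
          have h2 : (PySem.Set.add s x).filter p = s.filter p := by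
            simp only [PySem.Set.add, PySem.Set.contains]
            split_ifs with hm
            · rfl
            · simp [hp']
          have h3 := ih (PySem.Set.add s x)
          rw [h2] at h3
          exact h3
  have := key l []
  simpa [PySem.List.dedup_eq_ofList, PySem.Set.ofList_eq_foldl] using this

lemma pv_dedup_cons {α : Type} [BEq α] [LawfulBEq α] (c : α) (l : List α) :
    PySem.List.dedup (c :: l) = c :: (PySem.List.dedup l).filter (fun x => !(x == c)) := by
  rw [PySem.List.dedup_eq_ofList, PySem.Set.ofList_eq_foldl, List.foldl_cons]
  have h0 : PySem.Set.add ([] : List α) c = [c] := rfl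
  rw [h0, pv_foldl_add_cons l c []]
  rw [← PySem.Set.ofList_eq_foldl, ← PySem.List.dedup_eq_ofList, pv_dedup_filter]

lemma pv_foldl_skip {α β : Type} (P : α → Bool) (f : β → α → β) (l : List α)
    (h : ∀ d c, P c = false → f d c = d) : ∀ (d : β), l.foldl f d = (l.filter P).foldl f d := by
  induction l with
  | nil => intro d; rfl
  | cons x rest ih =>
      intro d
      by_cases hp : P x = true
      · simp [hp, ih]
      · have hp' : P x = false := by simpa using hp
        simp [hp', h d x hp', ih]



lemma pv_getD_foldl_insert_fun {ν : Type} (f : String → ν) (l : List String)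
    (d : PySem.Dict String ν) (k : String) (dflt : ν) :
    (l.foldl (fun d c => d.insert c (f c)) d).getD k dflt =
      if k ∈ l then f k else d.getD k dflt := by
  induction l generalizing d with
  | nil => simp
  | cons c rest ih =>
      simp only [List.foldl_cons, ih, List.mem_cons]
      by_cases hk : k ∈ rest
      · simp [hk]
      · by_cases hkc : k = c
        · simp [hkc, PySem.Dict.getD_insert_self]
        · simp [hk, hkc, PySem.Dict.getD_insert_of_ne _ _ _ hkc]

lemma pv_lowered_items (df_cols : List String) :
    (df_cols.foldl (fun d c => d.insert c (PySem.Str.lower c)) PySem.Dict.empty).items =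
      (PySem.List.dedup df_cols).map (fun c => (c, PySem.Str.lower c)) := by
  have hnd : (df_cols.foldl (fun d c => d.insert c (PySem.Str.lower c)) PySem.Dict.empty).keys.Nodup :=
    PySem.Dict.nodup_keys_foldl_insert df_cols (fun _ c => PySem.Str.lower c) _
      (by simp [PySem.Dict.keys_empty])
  have hkeys : (df_cols.foldl (fun d c => d.insert c (PySem.Str.lower c)) PySem.Dict.empty).keys =
      PySem.List.dedup df_cols := by
    have h := PySem.Dict.keys_foldl_insert df_cols (fun _ c => PySem.Str.lower c) (PySem.Dict.empty (ν := String))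
    simpa [PySem.Dict.keys_empty, PySem.List.dedup_eq_ofList, PySem.Set.update, PySem.Set.ofList,
      PySem.Set.empty] using h
  rw [PySem.Dict.items_eq_map_keys _ hnd "", hkeys]
  apply List.map_congr_left
  intro c hcm
  have hcmem : c ∈ df_cols := (PySem.List.mem_dedup df_cols c).mp hcm
  rw [pv_getD_foldl_insert_fun]
  simp [hcmem]


lemma pv_condinsert_items {ν : Type} (f : String → ν) (cols : List String) :
    ∀ (d : PySem.Dict String ν),
      (cols.foldl (fun d c => if !d.contains c then d.insert c (f c) else d) d).items =
        d.items ++ ((PySem.List.dedup cols).filter (fun c => !d.contains c)).map (fun c => (c, f c)) := by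
  induction cols with
  | nil => intro d; simp
  | cons c rest ih =>
      intro d
      rw [List.foldl_cons, pv_dedup_cons]
      by_cases hc : d.contains c = true
      · have hstep : (if !d.contains c then d.insert c (f c) else d) = d := by simp [hc]
        rw [hstep, ih d]
        congr 1
        rw [List.filter_cons]
        have : (!d.contains c) = false := by simp [hc]
        rw [this]
        simp only [Bool.false_eq_true, if_false]
        congr 1
        rw [List.filter_filter]
        apply List.filter_congr
        intro x _
        by_cases hxc : x = c
        · simp [hxc, hc]
        · simp [hxc]
      · have hc' : d.contains c = false := by simpa using hc
        have hstep : (if !d.contains c then d.insert c (f c) else d) = d.insert c (f c) := by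
          simp [hc']
        rw [hstep, ih (d.insert c (f c)), PySem.Dict.items_insert_of_not_contains d (f c) hc']
        rw [List.append_assoc]
        congr 1
        rw [List.filter_cons]
        have : (!d.contains c) = true := by simp [hc']
        rw [this]
        rw [if_pos rfl]
        simp only [List.map_cons, List.singleton_append]
        rw [List.filter_filter]
        refine congrArg (fun t => (c, f c) :: List.map (fun c => (c, f c)) t) ?_
        apply List.filter_congr
        intro x _
        rw [PySem.Dict.contains_insert]
        by_cases hxc : x = c
        · simp [hxc]
        · simp [show (x == c) = false from by simp [hxc]]


lemma pv_keys_items (df_cols : List String) :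
    (df_cols.foldl (fun d col =>
        let cl := PySem.Str.lower col
        if !pvProt.contains cl && !d.contains col then d.insert col (pvCandidateKeys cl.toList)
        else d) (PySem.Dict.empty : PySem.Dict String (PySem.Set (List Char)))).items =
      ((PySem.List.dedup df_cols).filter pvKeep).map
        (fun c => (c, pvCandidateKeys (PySem.Str.lower c).toList)) := by
  rw [pv_foldl_skip pvKeep _ df_cols
      (by intro d c hp
          simp only [pvKeep, Bool.not_eq_false', List.contains_iff_mem] at hp
          simp [hp])]
  rw [PySem.List.foldl_congr_mem (df_cols.filter pvKeep) _
      (fun d c => if !d.contains c then d.insert c (pvCandidateKeys (PySem.Str.lower c).toList) else d) _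
      (by intro acc x hx
          have hk : pvKeep x = true := (List.mem_filter.mp hx).2
          simp only [pvKeep, Bool.not_eq_eq_eq_not, Bool.not_true, List.contains_eq_mem,
            decide_eq_false_iff_not] at hk
          simp [hk])]
  rw [pv_condinsert_items]
  have h1 : (PySem.Dict.empty : PySem.Dict String (PySem.Set (List Char))).items = [] := rfl
  have h2 : ∀ c, (PySem.Dict.empty : PySem.Dict String (PySem.Set (List Char))).contains c = false :=
    fun c => rfl
  rw [h1, List.nil_append, pv_dedup_filter]
  have h3 : ∀ (L : List String), L.filter (fun c => !(PySem.Dict.empty : PySem.Dict String (PySem.Set (List Char))).contains c) = L := by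
    intro L
    apply List.filter_eq_self.mpr
    intro a _
    rw [h2 a]
    rfl
  rw [h3]


def pvAdds (cs : List Char) (ic : Int × Char) (x : List Char) : Prop :=
  ic.2 = '_' ∧ ((0 < ic.1 ∧ x = PySem.List.slice cs none (some ic.1)) ∨
    (ic.1 < (cs.length : Int) - 1 ∧ x = PySem.List.slice cs (some (ic.1 + 1)) none))

lemma pv_mem_step (cs : List Char) (acc : List (List Char)) (ic : Int × Char) (x : List Char) :
    (x ∈ (if ic.2 = '_' then
        (let ks1 := if 0 < ic.1 then PySem.Set.add acc (PySem.List.slice cs none (some ic.1)) else acc;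
         if ic.1 < (cs.length : Int) - 1 then PySem.Set.add ks1 (PySem.List.slice cs (some (ic.1 + 1)) none) else ks1)
      else acc)) ↔ x ∈ acc ∨ pvAdds cs ic x := by
  unfold pvAdds
  by_cases h1 : ic.2 = '_'
  · simp only [h1]
    by_cases h2 : 0 < ic.1 <;> by_cases h3 : ic.1 < (cs.length : Int) - 1 <;>
      first | (simp [h2, h3, PySem.Set.mem_add]; tauto) | simp [h2, h3, PySem.Set.mem_add]
  · simp only [if_neg h1]
    simp [h1]

lemma pv_mem_foldl_step (cs : List Char) (l : List (Int × Char)) :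
    ∀ (acc : List (List Char)) (x : List Char),
      (x ∈ l.foldl (fun ks ic =>
        if ic.2 = '_' then
          let ks1 := if 0 < ic.1 then PySem.Set.add ks (PySem.List.slice cs none (some ic.1)) else ks
          if ic.1 < (cs.length : Int) - 1 then PySem.Set.add ks1 (PySem.List.slice cs (some (ic.1 + 1)) none) else ks1
        else ks) acc) ↔ x ∈ acc ∨ ∃ ic ∈ l, pvAdds cs ic x := by
  induction l with
  | nil => intro acc x; simp
  | cons ic rest ih =>
      intro acc x
      rw [List.foldl_cons, ih]
      rw [pv_mem_step cs acc ic x]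
      constructor
      · rintro ((h | h) | ⟨jc, hm, hp⟩)
        · exact Or.inl h
        · exact Or.inr ⟨ic, List.mem_cons_self, h⟩
        · exact Or.inr ⟨jc, List.mem_cons_of_mem _ hm, hp⟩
      · rintro (h | ⟨jc, hm, hp⟩)
        · exact Or.inl (Or.inl h)
        · rcases List.mem_cons.mp hm with he | hm2
          · exact Or.inl (Or.inr (he ▸ hp))
          · exact Or.inr ⟨jc, hm2, hp⟩

lemma pv_mem_candKeys (cs x : List Char) :
    x ∈ pvCandidateKeys cs ↔ x = cs ∨ ∃ i, ∃ _ : i < cs.length, cs[i] = '_' ∧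
      ((0 < i ∧ x = cs.take i) ∨ (i + 1 < cs.length ∧ x = cs.drop (i + 1))) := by
  unfold pvCandidateKeys
  rw [pv_mem_foldl_step]
  have hbase : x ∈ PySem.Set.ofList [cs] ↔ x = cs := by
    rw [PySem.Set.mem_ofList]; simp
  rw [hbase]
  apply or_congr Iff.rfl
  constructor
  · rintro ⟨ic, hm, h⟩
    rw [PySem.List.mem_enumerate_iff] at hm
    obtain ⟨k, hk, hic⟩ := hm
    subst hic
    obtain ⟨hund, hcase⟩ := h
    simp only [zero_add] at hund hcase ⊢
    refine ⟨k, hk, hund, ?_⟩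
    rcases hcase with ⟨hpos, hx⟩ | ⟨hlt, hx⟩
    · left
      refine ⟨by exact_mod_cast hpos, ?_⟩
      rw [hx, PySem.List.slice_to cs (by positivity), Int.toNat_natCast]
    · right
      refine ⟨by omega, ?_⟩
      rw [hx]
      have h9 : ((k : Int) + 1) = ((k + 1 : Nat) : Int) := by push_cast; ring
      rw [h9, PySem.List.slice_from cs (by positivity), Int.toNat_natCast]
  · rintro ⟨i, hi, hund, hcase⟩
    refine ⟨((i : Int), cs[i]), ?_, ?_⟩
    · rw [PySem.List.mem_enumerate_iff]
      exact ⟨i, hi, by simp⟩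
    · unfold pvAdds
      refine ⟨hund, ?_⟩
      simp only []
      rcases hcase with ⟨hpos, hx⟩ | ⟨hlt, hx⟩
      · left
        refine ⟨by exact_mod_cast hpos, ?_⟩
        rw [hx, PySem.List.slice_to cs (by positivity), Int.toNat_natCast]
      · right
        constructor
        · omega
        · rw [hx]
          have h9 : ((i : Int) + 1) = ((i + 1 : Nat) : Int) := by push_cast; ring
          rw [h9, PySem.List.slice_from cs (by positivity), Int.toNat_natCast]

lemma pv_candKeys_iff_affix (cs x : List Char) :
    x ∈ pvCandidateKeys cs ↔ x = cs ∨ (x ≠ [] ∧ ((x ++ ['_']) <+: cs ∨ ('_' :: x) <:+ cs)) := by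
  rw [pv_mem_candKeys]
  apply or_congr Iff.rfl
  constructor
  · rintro ⟨i, hi, hund, hcase⟩
    rcases hcase with ⟨hpos, hx⟩ | ⟨hlt, hx⟩
    · have hxlen : x.length = i := by
        rw [hx, List.length_take]; omega
      refine ⟨by intro h; rw [h] at hxlen; simp at hxlen; omega, Or.inl ?_⟩
      have htake : x ++ ['_'] = cs.take (i + 1) := by
        rw [List.take_add_one, hx]
        congr 1
        rw [List.getElem?_eq_getElem hi, hund]
        rfl
      rw [htake]
      exact List.take_prefix _ _
    · have hxlen : x.length = cs.length - (i + 1) := by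
        rw [hx, List.length_drop]
      refine ⟨by intro h; rw [h] at hxlen; simp at hxlen; omega, Or.inr ?_⟩
      have hdrop : '_' :: x = cs.drop i := by
        rw [List.drop_eq_getElem_cons hi, hund, hx]
      rw [hdrop]
      exact List.drop_suffix _ _
  · rintro ⟨hne, hpre | hsuf⟩
    · have hlen : x.length + 1 ≤ cs.length := by
        have := hpre.length_le
        simpa using this
      have hi : x.length < cs.length := by omega
      refine ⟨x.length, hi, ?_, Or.inl ⟨by cases x <;> simp_all, ?_⟩⟩
      · have := hpre.getElem (i := x.length) (by simp)
        simpa using this.symm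
      · have hx : x <+: cs := (List.prefix_append x ['_']).trans hpre
        have := List.prefix_iff_eq_take.mp hx
        exact this
    · obtain ⟨t, ht⟩ := hsuf
      have hlen : cs.length = t.length + (x.length + 1) := by
        rw [← ht]; simp
      have hxpos : 0 < x.length := List.length_pos_iff.mpr hne
      have hi : t.length < cs.length := by omega
      refine ⟨t.length, hi, ?_, Or.inr ⟨by omega, ?_⟩⟩
      · subst ht
        rw [List.getElem_append_right (le_refl _)]
        simp
      · subst ht
        have h8 : t.length + 1 = (t ++ '_' :: x).length - x.length := by simp; omega
        rw [h8]
        have hsuf2 : x <:+ t ++ '_' :: x := ⟨t ++ ['_'], by simp⟩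
        exact (List.suffix_iff_eq_drop.mp hsuf2)


lemma pv_affix_eq_any (cl : String) (vs : List String) :
    pvAffixScan cl vs =
      vs.any (fun v => !(v == "") && (PySem.Str.startswith cl (v ++ "_") || PySem.Str.endswith cl ("_" ++ v))) := by
  induction vs with
  | nil => rfl
  | cons v rest ih =>
      by_cases hv : v = ""
      · have hv' : (v == "") = true := by simp [hv]
        simp only [pvAffixScan, if_pos hv, List.any_cons, hv', Bool.not_true, Bool.false_and,
          Bool.false_or]
        exact ih
      · have hv' : (v == "") = false := by simp [hv]
        simp only [pvAffixScan, if_neg hv, List.any_cons, hv', Bool.not_false, Bool.true_and]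
        cases hs : PySem.Str.startswith cl (v ++ "_") <;>
          cases he : PySem.Str.endswith cl ("_" ++ v) <;>
            simp only [if_true, Bool.false_or, Bool.true_or, Bool.or_true, Bool.or_false,
              Bool.false_eq_true, if_false, ih]

lemma pv_perv (cl v : String) :
    PySem.Chars.lower v.toList ∈ pvCandidateKeys cl.toList ↔
      (PySem.Str.lower v = cl ∨ (PySem.Str.lower v ≠ "" ∧
        (PySem.Str.startswith cl (PySem.Str.lower v ++ "_") ∨
         PySem.Str.endswith cl ("_" ++ PySem.Str.lower v)))) := by
  have hw : PySem.Chars.lower v.toList = (PySem.Str.lower v).toList := (PySem.Str.toList_lower v).symm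
  rw [hw, pv_candKeys_iff_affix]
  apply or_congr
  · exact String.toList_inj
  · apply and_congr
    · constructor
      · intro h hc; apply h; rw [hc]; rfl
      · intro h hc
        apply h
        apply String.toList_inj.mp
        rw [hc]
        rfl
    · apply or_congr
      · rw [PySem.Str.startswith_eq, PySem.Chars.startswith_iff, String.toList_append]
        have : ("_" : String).toList = ['_'] := by decide
        rw [this]
      · rw [PySem.Str.endswith_eq, PySem.Chars.endswith_iff, String.toList_append]
        have : ("_" : String).toList = ['_'] := by decide
        rw [this]
        rfl

lemma pv_match_eq (cl : String) (variants : List String) :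
    ((variants.map PySem.Str.lower).contains cl || pvAffixScan cl (variants.map PySem.Str.lower)) =
      !(PySem.Set.inter (pvCandidateKeys cl.toList)
          (PySem.Set.ofList (variants.map (fun v => PySem.Chars.lower v.toList)))).isEmpty := by
  rw [Bool.eq_iff_iff]
  rw [pv_affix_eq_any]
  constructor
  · intro h
    rcases Bool.or_eq_true_iff.mp h with h | h
    · -- exact match
      have hm : cl ∈ variants.map PySem.Str.lower := List.contains_iff_mem.mp h
      obtain ⟨v, hv, he⟩ := List.mem_map.mp hm
      have : PySem.Chars.lower v.toList ∈ pvCandidateKeys cl.toList :=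
        (pv_perv cl v).mpr (Or.inl he)
      simp only [Bool.not_eq_eq_eq_not, Bool.not_true, List.isEmpty_eq_false_iff, ne_eq]
      intro hnil
      have : PySem.Chars.lower v.toList ∈ PySem.Set.inter (pvCandidateKeys cl.toList)
          (PySem.Set.ofList (variants.map (fun v => PySem.Chars.lower v.toList))) := by
        apply List.mem_filter.mpr
        refine ⟨this, ?_⟩
        show PySem.Set.contains _ _ = true
        unfold PySem.Set.contains
        apply List.contains_iff_mem.mpr
        apply (PySem.Set.mem_ofList _ _).mpr
        exact List.mem_map.mpr ⟨v, hv, rfl⟩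
      rw [hnil] at this
      exact absurd this List.not_mem_nil
    · obtain ⟨lv, hlv, hcond⟩ := List.any_eq_true.mp h
      obtain ⟨v, hv, he⟩ := List.mem_map.mp hlv
      obtain ⟨hne, haff⟩ := Bool.and_eq_true_iff.mp hcond
      have hne' : lv ≠ "" := by simpa using hne
      have : PySem.Chars.lower v.toList ∈ pvCandidateKeys cl.toList := by
        apply (pv_perv cl v).mpr
        right
        rw [he]
        exact ⟨hne', by rcases Bool.or_eq_true_iff.mp haff with h | h; exact Or.inl h; exact Or.inr h⟩
      simp only [Bool.not_eq_eq_eq_not, Bool.not_true, List.isEmpty_eq_false_iff, ne_eq]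
      intro hnil
      have hmem : PySem.Chars.lower v.toList ∈ PySem.Set.inter (pvCandidateKeys cl.toList)
          (PySem.Set.ofList (variants.map (fun v => PySem.Chars.lower v.toList))) := by
        apply List.mem_filter.mpr
        refine ⟨this, ?_⟩
        show PySem.Set.contains _ _ = true
        unfold PySem.Set.contains
        apply List.contains_iff_mem.mpr
        apply (PySem.Set.mem_ofList _ _).mpr
        exact List.mem_map.mpr ⟨v, hv, rfl⟩
      rw [hnil] at hmem
      exact absurd hmem List.not_mem_nil
  · intro h
    simp only [Bool.not_eq_eq_eq_not, Bool.not_true, List.isEmpty_eq_false_iff, ne_eq] at h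
    obtain ⟨y, hy⟩ := List.exists_mem_of_ne_nil _ h
    have hy1 := List.mem_filter.mp hy
    obtain ⟨hyk, hyc⟩ := hy1
    have hyv : y ∈ variants.map (fun v => PySem.Chars.lower v.toList) := by
      apply (PySem.Set.mem_ofList _ _).mp
      exact List.contains_iff_mem.mp hyc
    obtain ⟨v, hv, he⟩ := List.mem_map.mp hyv
    have := (pv_perv cl v).mp (he ▸ hyk)
    rcases this with h1 | ⟨h2, h3⟩
    · apply Bool.or_eq_true_iff.mpr
      left
      apply List.contains_iff_mem.mpr
      exact List.mem_map.mpr ⟨v, hv, h1⟩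
    · apply Bool.or_eq_true_iff.mpr
      right
      apply List.any_eq_true.mpr
      refine ⟨PySem.Str.lower v, List.mem_map.mpr ⟨v, hv, rfl⟩, ?_⟩
      apply Bool.and_eq_true_iff.mpr
      exact ⟨by simpa using h2, by rcases h3 with h | h; exact Bool.or_eq_true_iff.mpr (Or.inl h); exact Bool.or_eq_true_iff.mpr (Or.inr h)⟩

-- === assembling the two programs ===

theorem pv_A_eq (df_cols : List String) (columns_map : List (String × List String)) :
    build_rename_map_py df_cols columns_map = build_rename_map_py_alt df_cols columns_map := by
  simp only [build_rename_map_py, build_rename_map_py_alt]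
  rw [pv_lowered_items, pv_keys_items]
  congr 1
  apply PySem.List.foldl_congr_mem
  intro rd tv _
  rw [List.foldl_map, List.foldl_map]
  rw [pv_foldl_skip pvKeep _ (PySem.List.dedup df_cols)
      (by intro acc c hp
          simp only [pvKeep, Bool.not_eq_false', List.contains_iff_mem] at hp
          simp [hp]) rd]
  apply PySem.List.foldl_congr_mem
  intro acc c hc
  have hk : pvKeep c = true := (List.mem_filter.mp hc).2
  have hprot : pvProt.contains (PySem.Str.lower c) = false := by
    simpa [pvKeep] using hk
  dsimp only
  rw [if_neg (by simpa using hprot)]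
  have hm := pv_match_eq (PySem.Str.lower c) tv.2
  cases hE : (PySem.Set.inter (pvCandidateKeys (PySem.Str.lower c).toList)
      (PySem.Set.ofList (tv.2.map (fun v => PySem.Chars.lower v.toList)))).isEmpty with
  | true =>
      rw [hE, Bool.not_true] at hm
      obtain ⟨hco, haf⟩ := Bool.or_eq_false_iff.mp hm
      rw [if_pos rfl, if_neg (by rw [hco]; simp), if_neg (by rw [haf]; simp)]
  | false =>
      rw [hE, Bool.not_false] at hm
      conv_rhs => rw [if_neg (by simp : ¬(false = true))]
      rcases Bool.or_eq_true_iff.mp hm with h | h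
      · rw [if_pos h]
      · by_cases hco : (tv.2.map PySem.Str.lower).contains (PySem.Str.lower c) = true
        · rw [if_pos hco]
        · rw [if_neg hco, if_pos h]

-- ===== VERDICT (by name: the statement is the Claim_ definition above) =====
theorem build_rename_map_py_spec : Claim_equal_build_rename_map_py := by
  intro df_cols columns_map _
  unfold Spec_build_rename_map_py
  exact pv_A_eq df_cols columns_map
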